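-- pv_equiv track=rewrite | github.com/LeeeWayyy/trading_platform | libs/backtest/param_search.py | _lazy_random_params_iterator
-- ===== SOURCE A (Python) =====
-- from collections.abc import Callable, Iterator
-- from typing import Any
--
-- def _lazy_random_params_iterator(
--     param_distributions: dict[str, list[Any]],
--     indices: list[int],
-- ) -> Iterator[dict[str, Any]]:
--     """Lazily generate parameter dicts for given indices without full materialization.
--
--     Uses index decomposition to compute parameters directly from flat indices,
--     matching itertools.product ordering (rightmost key varies fastest).
--
--     For a grid with dimensions [d1, d2, ..., dn], index i maps to:
--         in = i % dn                     (last/rightmost key)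
--         i(n-1) = (i // dn) % d(n-1)
--         ...
--         i1 = (i // (dn * ... * d2)) % d1  (first/leftmost key)
--     """
--     if not param_distributions:
--         for _ in indices:
--             yield {}
--         return
--
--     keys = list(param_distributions.keys())
--     value_lists = [param_distributions[k] for k in keys]
--     sizes = [len(v) for v in value_lists]
--
--     for idx in indices:
--         params = {}
--         remaining = idx
--         # Iterate in reverse order to match itertools.product ordering
--         # (rightmost key varies fastest)
--         for i in range(len(keys) - 1, -1, -1):
--             params[keys[i]] = value_lists[i][remaining % sizes[i]]
--             remaining //= sizes[i]
--         yield params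
-- ===== SOURCE B (Python) =====
-- def _lazy_random_params_iterator(param_distributions, indices):
--     # staged decomposition: reversed item table with prefix-product strides and sizes
--     # built once, then direct per-key extraction (idx // stride) % size per yielded dict
--     rev = list(reversed(param_distributions.items()))
--     rstrides = []
--     acc = 1
--     for _, vs in rev:
--         rstrides.append(acc)
--         acc *= len(vs)
--     table = [(k, vs, st, len(vs)) for (k, vs), st in zip(rev, rstrides)]
--     for idx in indices:
--         yield {k: vs[(idx // st) % m] for k, vs, st, m in table}
-- ===== Notes on version B (the rewrite author's own statement) =====
-- stated objective: alternative
-- what changed: Replaces A's per-index reverse indexed loop threading a running remainder (remaining % sizes[i]; remaining //= sizes[i]) by two staged passes: a prefix-product stride table over the reversed item list built once, then a zip of (key, values) pairs with their strides extracting values[(idx // stride) % size] directly, with no special empty-dict branch.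
-- outside the precondition, e.g. on _lazy_random_params_iterator({'a': []}, [0]): A raises ZeroDivisionError, B raises ZeroDivisionError
import Mathlib
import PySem

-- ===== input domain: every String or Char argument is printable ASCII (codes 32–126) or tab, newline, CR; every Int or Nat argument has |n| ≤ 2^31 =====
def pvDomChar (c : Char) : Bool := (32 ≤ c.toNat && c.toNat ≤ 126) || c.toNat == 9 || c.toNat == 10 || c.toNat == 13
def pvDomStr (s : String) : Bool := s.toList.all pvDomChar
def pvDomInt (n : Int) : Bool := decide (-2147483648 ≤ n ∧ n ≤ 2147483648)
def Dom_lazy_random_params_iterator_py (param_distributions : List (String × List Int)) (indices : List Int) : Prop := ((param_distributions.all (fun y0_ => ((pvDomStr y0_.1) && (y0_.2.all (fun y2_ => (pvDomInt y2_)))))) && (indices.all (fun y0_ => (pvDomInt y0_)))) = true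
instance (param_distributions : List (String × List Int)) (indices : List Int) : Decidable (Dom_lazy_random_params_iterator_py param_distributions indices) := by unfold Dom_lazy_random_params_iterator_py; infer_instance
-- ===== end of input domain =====

-- B replaces A's per-index reverse loop threading a running remainder (remaining % / //= sizes[i])
-- by two staged passes: a prefix-product stride table over the reversed item list built once, then a
-- zip of (key, values) with its stride extracting values[(idx // stride) % size] directly; objective: alternative.

-- ===== PORT A =====
-- inner loop of A: for i in range(len(keys)-1, -1, -1): params[keys[i]] = value_lists[i][remaining % sizes[i]]; remaining //= sizes[i]
def pvAInner (keys : List String) (vl : List (List Int)) (sizes : List Int) :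
    Nat → PySem.Dict String Int × Int → PySem.Dict String Int × Int
  | 0, st => st
  | i+1, (params, remaining) =>
      let s := sizes.getD i 0
      let v := (PySem.List.pyGet? (vl.getD i []) (PySem.Int.mod remaining s)).getD 0
      pvAInner keys vl sizes i (params.insert (keys.getD i "") v, PySem.Int.floordiv remaining s)

def lazy_random_params_iterator_py (param_distributions : List (String × List Int)) (indices : List Int) : List (List (String × Int)) :=
  if param_distributions.isEmpty then indices.map (fun _ => [])
  else
    let keys := param_distributions.map Prod.fst
    let value_lists := keys.map (fun k => ((PySem.Dict.mk param_distributions).get? k).getD [])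
    let sizes := value_lists.map (fun v => (v.length : Int))
    indices.map (fun idx =>
      (pvAInner keys value_lists sizes keys.length (PySem.Dict.empty, idx)).1.items)

-- ===== PORT B =====
def lazy_random_params_iterator_py_alt (param_distributions : List (String × List Int)) (indices : List Int) : List (List (String × Int)) :=
  let rev := param_distributions.reverse
  -- for _, vs in rev: rstrides.append(acc); acc *= len(vs)
  let rstrides := (rev.foldl (fun (st : List Int × Int) p => (st.1 ++ [st.2], st.2 * (p.2.length : Int))) ([], 1)).1
  -- table = [(k, vs, st, len(vs)) for (k, vs), st in zip(rev, rstrides)]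
  let table := (rev.zip rstrides).map (fun q => (q.1.1, q.1.2, q.2, (q.1.2.length : Int)))
  indices.map (fun idx =>
    (PySem.Dict.ofList (table.map (fun t =>
      (t.1, (PySem.List.pyGet? t.2.1 (PySem.Int.mod (PySem.Int.floordiv idx t.2.2.1) t.2.2.2)).getD 0)))).items)

-- ===== PRECONDITION & SPEC =====
-- Pre_ excludes (a) inputs where A raises ZeroDivisionError (a non-empty param_distributions with an
-- empty value list, consumed for at least one index), and (b) association lists with duplicate keys,
-- which represent no Python dict input (a dict's keys are unique); both only when indices is non-empty.
def Pre_lazy_random_params_iterator_py (param_distributions : List (String × List Int)) (indices : List Int) : Prop :=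
  indices = [] ∨
    ((param_distributions.map Prod.fst).Nodup ∧ ∀ p ∈ param_distributions, p.2 ≠ [])
instance (param_distributions : List (String × List Int)) (indices : List Int) : Decidable (Pre_lazy_random_params_iterator_py param_distributions indices) := by unfold Pre_lazy_random_params_iterator_py; infer_instance

def pvWitness_lazy_random_params_iterator_py : (List (String × List Int)) × List Int :=
  ([("a", [1, 2]), ("b", [3, 4, 5])], [0, 5, -1])

def Spec_lazy_random_params_iterator_py (param_distributions : List (String × List Int)) (indices : List Int) (out : List (List (String × Int))) : Prop := out = lazy_random_params_iterator_py_alt param_distributions indices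
instance (param_distributions : List (String × List Int)) (indices : List Int) (out : List (List (String × Int))) : Decidable (Spec_lazy_random_params_iterator_py param_distributions indices out) := by unfold Spec_lazy_random_params_iterator_py; infer_instance

-- ===== CLAIM (what is proved, stated in full; the proofs are below) =====
def Claim_equal_lazy_random_params_iterator_py : Prop := ∀ (param_distributions : List (String × List Int)) (indices : List Int), Dom_lazy_random_params_iterator_py param_distributions indices → Pre_lazy_random_params_iterator_py param_distributions indices → Spec_lazy_random_params_iterator_py param_distributions indices (lazy_random_params_iterator_py param_distributions indices)

-- ===== LEMMAS AND PROOFS =====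

-- proof-only helper: A's counted-down indexed loop, re-read as structural recursion over the reversed list
def pvFoldA : List (String × List Int) → PySem.Dict String Int × Int → PySem.Dict String Int × Int
  | [], st => st
  | p :: rest, (d, r) =>
      pvFoldA rest (d.insert p.1 ((PySem.List.pyGet? p.2 (PySem.Int.mod r (p.2.length : Int))).getD 0),
                    PySem.Int.floordiv r (p.2.length : Int))

-- proof-only helper: prefix products of the value-list lengths
def pvPref : List (String × List Int) → List Int
  | [] => []
  | p :: rest => 1 :: (pvPref rest).map (fun x => (p.2.length : Int) * x)

theorem pvPref_length (L : List (String × List Int)) : (pvPref L).length = L.length := by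
  induction L with
  | nil => rfl
  | cons p rest ih => simp [pvPref, ih]

theorem pvPref_pos (L : List (String × List Int)) (h : ∀ p ∈ L, p.2 ≠ []) :
    ∀ x ∈ pvPref L, 0 < x := by
  induction L with
  | nil => simp [pvPref]
  | cons p rest ih =>
    intro x hx
    simp only [pvPref, List.mem_cons, List.mem_map] at hx
    rcases hx with rfl | ⟨y, hy, rfl⟩
    · exact one_pos
    · have hp : 0 < (p.2.length : Int) := by
        have := h p (by simp); simpa [Int.natCast_pos, List.length_pos_iff] using this
      exact mul_pos hp (ih (fun q hq => h q (List.mem_cons_of_mem _ hq)) y hy)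

-- B's stride-building loop computes the prefix products (shifted by the running accumulator)
theorem pvFoldB (L : List (String × List Int)) (acc : List Int) (a : Int) :
    (L.foldl (fun (st : List Int × Int) p => (st.1 ++ [st.2], st.2 * (p.2.length : Int))) (acc, a)).1
      = acc ++ (pvPref L).map (fun x => a * x) := by
  induction L generalizing acc a with
  | nil => simp [pvPref]
  | cons p rest ih =>
    simp only [List.foldl_cons, pvPref, List.map_cons, List.map_map]
    rw [ih]
    simp [Function.comp_def, mul_comm, mul_left_comm]

-- A's indexed count-down loop is pvFoldA over the reversed prefix
theorem pvAInner_eq_fold (pd : List (String × List Int)) (m : Nat) (hm : m ≤ pd.length)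
    (st : PySem.Dict String Int × Int) :
    pvAInner (pd.map Prod.fst) (pd.map Prod.snd) (pd.map (fun p => (p.2.length : Int))) m st
      = pvFoldA ((pd.take m).reverse) st := by
  induction m generalizing st with
  | zero => simp [pvAInner, pvFoldA]
  | succ i ih =>
    obtain ⟨d, r⟩ := st
    have him : i < pd.length := hm
    have htake : (pd.take (i+1)).reverse = pd[i] :: (pd.take i).reverse := by
      rw [List.take_add_one, List.getElem?_eq_getElem him]
      simp
    simp only [pvAInner, htake, pvFoldA]
    rw [List.getD_eq_getElem _ _ (by simpa using him), List.getD_eq_getElem _ _ (by simpa using him),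
        List.getD_eq_getElem _ _ (by simpa using him)]
    simp only [List.getElem_map]
    exact ih (Nat.le_of_succ_le hm) _

-- the remainder-threading fold produces exactly the zip-with-strides extraction
theorem pvFoldA_items (L : List (String × List Int)) (d : PySem.Dict String Int) (r : Int)
    (hnd : (L.map Prod.fst).Nodup) (hfresh : ∀ p ∈ L, d.contains p.1 = false)
    (hne : ∀ p ∈ L, p.2 ≠ []) :
    (pvFoldA L (d, r)).1.items
      = d.items ++ (L.zip (pvPref L)).map (fun q =>
          (q.1.1, (PySem.List.pyGet? q.1.2 (PySem.Int.mod (PySem.Int.floordiv r q.2) (q.1.2.length : Int))).getD 0)) := by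
  induction L generalizing d r with
  | nil => simp [pvFoldA]
  | cons p rest ih =>
    have hp : 0 < ((p.2).length : Int) := by
      have := hne p (by simp); simpa [Int.natCast_pos, List.length_pos_iff] using this
    have hndr : (rest.map Prod.fst).Nodup := by simpa using hnd.of_cons
    have hfr : ∀ q ∈ rest, (d.insert p.1 ((PySem.List.pyGet? p.2 (PySem.Int.mod r (p.2.length : Int))).getD 0)).contains q.1 = false := by
      intro q hq
      have hqp : q.1 ≠ p.1 := by
        have hnotin : p.1 ∉ rest.map Prod.fst := by
          simp only [List.map_cons, List.nodup_cons] at hnd; exact hnd.1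
        intro h; exact hnotin (h ▸ List.mem_map_of_mem hq)
      rw [PySem.Dict.contains_insert]
      simp [hqp, hfresh q (by simp [hq])]
    simp only [pvFoldA]
    rw [ih _ _ hndr hfr (fun q hq => hne q (by simp [hq]))]
    rw [PySem.Dict.items_insert_of_not_contains _ _ (hfresh p (by simp))]
    simp only [pvPref, List.zip_cons_cons, List.map_cons, List.append_assoc, List.cons_append,
      List.nil_append]
    rw [List.zip_map_right, List.map_map]
    congr 2
    · simp [PySem.Int.floordiv]
    · apply List.map_congr_left
      intro q hq
      have hx : 0 < q.2 := pvPref_pos rest (fun z hz => hne z (List.mem_cons_of_mem _ hz)) q.2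
        (List.of_mem_zip hq).2
      have harith : PySem.Int.floordiv (PySem.Int.floordiv r (p.2.length : Int)) q.2
          = PySem.Int.floordiv r ((p.2.length : Int) * q.2) := by
        simp only [PySem.Int.floordiv]; exact Int.fdiv_fdiv_eq_fdiv_mul r hp.le hx.le
      simp [Prod.map, harith]

-- with nodup keys, the dict lookup in A's value_lists is the paired value
theorem pvValueLists (pd : List (String × List Int)) (hnd : (pd.map Prod.fst).Nodup) :
    (pd.map Prod.fst).map (fun k => ((PySem.Dict.mk pd).get? k).getD []) = pd.map Prod.snd := by
  apply List.ext_getElem (by simp)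
  intro i h1 h2
  have hip : i < pd.length := by simpa using h2
  simp only [List.getElem_map]
  have hmem : (pd[i].1, pd[i].2) ∈ (PySem.Dict.mk pd).items := by
    exact (Prod.mk.eta (p := pd[i])) ▸ List.getElem_mem hip
  have hk : (PySem.Dict.mk pd).keys.Nodup := by simpa [PySem.Dict.keys] using hnd
  rw [PySem.Dict.get?_of_mem_items _ hmem hk, Option.getD_some]

-- B's per-index dict comprehension over distinct keys lists its pairs verbatim
theorem pvOfList_items (l : List (String × Int)) (hnd : (l.map Prod.fst).Nodup) :
    (PySem.Dict.ofList l).items = l := by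
  unfold PySem.Dict.ofList PySem.Dict.update
  have := PySem.Dict.items_foldl_insert_fresh (l := l) (d := PySem.Dict.empty)
    (k := Prod.fst) (v := Prod.snd) (by intro a _; simp) hnd
  simpa using this

-- ===== VERDICT (by name: the statement is the Claim_ definition above) =====
theorem lazy_random_params_iterator_py_spec : Claim_equal_lazy_random_params_iterator_py := by
  intro pd indices _ hpre
  unfold Spec_lazy_random_params_iterator_py
  unfold lazy_random_params_iterator_py lazy_random_params_iterator_py_alt
  rcases hpre with h | ⟨hnd, hne⟩
  · subst h; simp
  · by_cases hpd : pd.isEmpty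
    · rw [List.isEmpty_iff] at hpd
      subst hpd
      refine (List.map_congr_left ?_)
      intro idx _
      rfl
    · simp only [hpd]
      apply List.map_congr_left
      intro idx _
      -- A side: rewrite value_lists/sizes, then the loop as a fold over the reversed list
      rw [pvValueLists pd hnd]
      have hsz : (pd.map Prod.snd).map (fun v => (v.length : Int)) = pd.map (fun p => (p.2.length : Int)) := by
        simp [Function.comp_def]
      rw [hsz]
      have hlen : (pd.map Prod.fst).length = pd.length := by simp
      rw [hlen, pvAInner_eq_fold pd pd.length le_rfl, List.take_length]
      have hndrev : (pd.reverse.map Prod.fst).Nodup := by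
        rw [List.map_reverse, List.nodup_reverse]; exact hnd
      have hnerev : ∀ p ∈ pd.reverse, p.2 ≠ [] := fun p hp => hne p (List.mem_reverse.mp hp)
      rw [pvFoldA_items pd.reverse PySem.Dict.empty idx hndrev (by intro p _; simp) hnerev]
      -- B side: strides are the prefix products, and the built dict lists its pairs
      rw [pvFoldB pd.reverse [] 1, List.nil_append]
      rw [List.map_map]
      simp only [Function.comp_def]
      have hone : (pvPref pd.reverse).map (fun x => (1:Int) * x) = pvPref pd.reverse := by simp
      rw [hone]
      -- keys of the zipped pair list are the (nodup) reversed keys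
      have hfst : ((pd.reverse.zip (pvPref pd.reverse)).map (fun q => q.1.1)) = pd.reverse.map Prod.fst := by
        apply List.ext_getElem (by simp [List.length_zip, pvPref_length])
        intro i h1 h2
        simp [List.getElem_zip]
      have hkeys : ((((pd.reverse.zip (pvPref pd.reverse)).map (fun q =>
          (q.1.1, (PySem.List.pyGet? q.1.2 (PySem.Int.mod (PySem.Int.floordiv idx q.2) (q.1.2.length : Int))).getD 0)))).map Prod.fst).Nodup := by
        rw [List.map_map]
        simp only [Function.comp_def]
        rw [hfst]
        exact hndrev
      rw [pvOfList_items _ hkeys]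
      simp [PySem.Dict.empty]
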